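-- pv_equiv track=rewrite | github.com/cha-no/Algorithm_Study | 트리/programers_level4_Hotel_room_assignment.py | solution
-- ===== SOURCE A (Python) =====
-- from typing import List
--
-- def solution(k : int, room_number : List[int]) -> List[int]:
--     answer = []
--     room_dict = {}
--
--     for room in room_number:
--         visit = []
--         root = room
--         while root in room_dict:
--             visit.append(root)
--             root = room_dict[root]
--
--         for room in visit:
--             room_dict[room] = root
--
--         answer.append(root)
--         room_dict[root] = root + 1
--
--     return answer
-- ===== SOURCE B (Python) =====
-- from typing import List
--
-- def solution(k : int, room_number : List[int]) -> List[int]: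
--     occupied = set()
--     answer = []
--     for room in room_number:
--         r = room
--         while r in occupied:
--             r += 1
--         occupied.add(r)
--         answer.append(r)
--     return answer
-- ===== Notes on version B (the rewrite author's own statement) =====
-- stated objective: simpler
-- what changed: Replaces the parent-pointer dictionary with path compression by a plain occupied set scanned linearly upward from the requested room.
import Mathlib
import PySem

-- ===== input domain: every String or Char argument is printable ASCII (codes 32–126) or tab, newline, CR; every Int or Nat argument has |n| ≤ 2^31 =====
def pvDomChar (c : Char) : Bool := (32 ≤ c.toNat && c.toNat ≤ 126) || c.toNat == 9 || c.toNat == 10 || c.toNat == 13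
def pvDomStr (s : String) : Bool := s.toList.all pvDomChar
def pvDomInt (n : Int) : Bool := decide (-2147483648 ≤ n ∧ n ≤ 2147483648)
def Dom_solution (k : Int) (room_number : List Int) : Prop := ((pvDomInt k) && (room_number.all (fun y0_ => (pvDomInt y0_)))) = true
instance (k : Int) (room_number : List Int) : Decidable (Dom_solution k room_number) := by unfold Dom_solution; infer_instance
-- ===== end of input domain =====

-- B replaces A's path-compressed parent-pointer dictionary by a plain occupied set with an
-- upward linear scan; same return value, simpler bookkeeping (no speed claim).

-- ===== PORT A =====
-- A's while-loop: follow the parent chain, recording visited rooms. Fuel (number of keys + 1)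
-- only totalises the loop; the proofs show it is never exhausted (the chain is strictly increasing).
def solutionFind (d : PySem.Dict Int Int) (fuel : Nat) (root : Int) (visit : List Int) :
    Int × List Int :=
  match fuel with
  | 0 => (root, visit)
  | n+1 =>
    match d.get? root with
    | none => (root, visit)
    | some v => solutionFind d n v (visit ++ [root])

def solution (k : Int) (room_number : List Int) : List Int :=
  (room_number.foldl
    (fun (st : List Int × PySem.Dict Int Int) room =>
      let fv := solutionFind st.2 (st.2.keys.length + 1) room []
      let d2 := fv.2.foldl (fun d r => d.insert r fv.1) st.2
      (st.1 ++ [fv.1], d2.insert fv.1 (fv.1 + 1)))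
    ([], PySem.Dict.empty)).1

-- ===== PORT B =====
-- B's while-loop: smallest r ≥ room not in the occupied set, by scanning upward.
-- Fuel (set size + 1) only totalises (at most |occ| members can be ≥ the scan start).
def scanFree (occ : PySem.Set Int) (fuel : Nat) (r : Int) : Int :=
  match fuel with
  | 0 => r
  | n+1 => if occ.contains r then scanFree occ n (r+1) else r

def solution_alt (k : Int) (room_number : List Int) : List Int :=
  (room_number.foldl
    (fun (st : List Int × PySem.Set Int) room =>
      let r := scanFree st.2 (st.2.length + 1) room
      (st.1 ++ [r], PySem.Set.add st.2 r))
    ([], PySem.Set.empty)).1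

-- ===== PRECONDITION & SPEC =====
def Spec_solution (k : Int) (room_number : List Int) (out : List Int) : Prop := out = solution_alt k room_number
instance (k : Int) (room_number : List Int) (out : List Int) : Decidable (Spec_solution k room_number out) := by unfold Spec_solution; infer_instance

-- ===== CLAIM (what is proved, stated in full; the proofs are below) =====
def Claim_equal_solution : Prop := ∀ (k : Int) (room_number : List Int), Dom_solution k room_number → Spec_solution k room_number (solution k room_number)

-- ===== LEMMAS AND PROOFS =====

-- ρ is the least room ≥ start that is not in K
def LeastFree (K : List Int) (start ρ : Int) : Prop :=
  start ≤ ρ ∧ ρ ∉ K ∧ ∀ s, start ≤ s → s < ρ → s ∈ K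

theorem LeastFree_unique {K : List Int} {start ρ₁ ρ₂ : Int}
    (h₁ : LeastFree K start ρ₁) (h₂ : LeastFree K start ρ₂) : ρ₁ = ρ₂ := by
  obtain ⟨ha₁, hb₁, hc₁⟩ := h₁
  obtain ⟨ha₂, hb₂, hc₂⟩ := h₂
  rcases lt_trichotomy ρ₁ ρ₂ with h | h | h
  · exact absurd (hc₂ ρ₁ ha₁ h) hb₁
  · exact h
  · exact absurd (hc₁ ρ₂ ha₂ h) hb₂

theorem LeastFree_congr {K K' : List Int} {start ρ : Int}
    (hK : ∀ x, x ∈ K ↔ x ∈ K') (h : LeastFree K start ρ) : LeastFree K' start ρ := by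
  obtain ⟨ha, hb, hc⟩ := h
  exact ⟨ha, fun hx => hb ((hK ρ).mpr hx), fun s hs hs' => (hK s).mp (hc s hs hs')⟩

-- stepping past a member strictly decreases the count of elements at or above the scan point
theorem countP_step_lt (l : List Int) (r : Int) (hr : r ∈ l) :
    l.countP (fun s => decide (r + 1 ≤ s)) < l.countP (fun s => decide (r ≤ s)) := by
  induction l with
  | nil => cases hr
  | cons a t ih =>
    have hmono : t.countP (fun s => decide (r + 1 ≤ s)) ≤ t.countP (fun s => decide (r ≤ s)) :=
      List.countP_mono_left (fun s _ hp => by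
        simp only [decide_eq_true_eq] at hp ⊢; omega)
    simp only [List.countP_cons]
    rcases List.mem_cons.mp hr with h | h
    · have h1 : decide (r ≤ a) = true := by simp [h]
      have h2 : decide (r + 1 ≤ a) = false := by simp [h]
      rw [h1, h2]
      simp only [Bool.false_eq_true, if_true, if_false]
      omega
    · have := ih h
      by_cases hc : (r + 1 : Int) ≤ a
      · have hc2 : (r : Int) ≤ a := by omega
        simp only [hc, hc2, decide_true, if_true]
        omega
      · by_cases hc2 : (r : Int) ≤ a <;>
          simp only [hc, hc2, decide_true, decide_false, Bool.false_eq_true, if_true,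
            if_false] <;> omega

theorem countP_le_of_le (l : List Int) {a b : Int} (h : a ≤ b) :
    l.countP (fun s => decide (b ≤ s)) ≤ l.countP (fun s => decide (a ≤ s)) :=
  List.countP_mono_left (fun s _ hp => by simp only [decide_eq_true_eq] at hp ⊢; omega)

-- B's scan computes the least free room, given enough fuel
theorem scanFree_spec (occ : PySem.Set Int) :
    ∀ (fuel : Nat) (r : Int),
      occ.countP (fun s => decide (r ≤ s)) < fuel → LeastFree occ r (scanFree occ fuel r) := by
  intro fuel
  induction fuel with
  | zero => intro r h; omega
  | succ n ih =>
    intro r h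
    by_cases hc : r ∈ occ
    · have hcb : PySem.Set.contains occ r = true := (PySem.Set.contains_iff occ r).mpr hc
      have hstep : scanFree occ (n + 1) r = scanFree occ n (r + 1) := by
        simp only [scanFree]
        rw [if_pos hcb]
      rw [hstep]
      have hlt := countP_step_lt occ r hc
      obtain ⟨ha, hb, hcc⟩ := ih (r + 1) (by omega)
      refine ⟨by omega, hb, fun s hs hs' => ?_⟩
      by_cases hsr : s = r
      · rw [hsr]; exact hc
      · exact hcc s (by omega) hs'
    · have hcb : ¬ (PySem.Set.contains occ r = true) :=
        fun hb => hc ((PySem.Set.contains_iff occ r).mp hb)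
      have hstep : scanFree occ (n + 1) r = r := by
        simp only [scanFree]
        rw [if_neg hcb]
      rw [hstep]
      exact ⟨le_refl r, hc, fun s hs hs' => by omega⟩

-- the invariant A's dictionary maintains: every stored pointer moves strictly up and
-- every room in between is itself a key
def InvD (d : PySem.Dict Int Int) : Prop :=
  ∀ r v, d.get? r = some v → r < v ∧ ∀ s, r ≤ s → s < v → s ∈ d.keys

theorem mem_keys_of_get?_eq_some {d : PySem.Dict Int Int} {r v : Int}
    (h : d.get? r = some v) : r ∈ d.keys := by
  by_contra hnot
  rw [(PySem.Dict.get?_eq_none_iff_not_mem_keys d r).mpr hnot] at h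
  cases h

-- A's chain chase computes the least free room and visits only keys strictly below it
theorem solutionFind_spec {d : PySem.Dict Int Int} (hInv : InvD d) :
    ∀ (fuel : Nat) (r : Int) (visit : List Int),
      d.keys.countP (fun s => decide (r ≤ s)) < fuel →
      LeastFree d.keys r (solutionFind d fuel r visit).1 ∧
      ∀ x ∈ (solutionFind d fuel r visit).2,
        x ∈ visit ∨ (r ≤ x ∧ x < (solutionFind d fuel r visit).1 ∧ x ∈ d.keys) := by
  intro fuel
  induction fuel with
  | zero => intro r visit h; omega
  | succ n ih =>
    intro r visit h
    cases hg : d.get? r with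
    | none =>
      have hnk : r ∉ d.keys := (PySem.Dict.get?_eq_none_iff_not_mem_keys d r).mp hg
      simp only [solutionFind, hg]
      exact ⟨⟨le_refl r, hnk, fun s hs hs' => by omega⟩, fun x hx => Or.inl hx⟩
    | some v =>
      obtain ⟨hrv, hint⟩ := hInv r v hg
      have hrk : r ∈ d.keys := mem_keys_of_get?_eq_some hg
      have hfuel : d.keys.countP (fun s => decide (v ≤ s)) < n := by
        have h1 := countP_step_lt d.keys r hrk
        have h2 := countP_le_of_le d.keys (show r + 1 ≤ v by omega)
        omega
      obtain ⟨⟨ha, hb, hc⟩, hvis⟩ := ih v (visit ++ [r]) hfuel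
      simp only [solutionFind, hg]
      refine ⟨⟨by omega, hb, fun s hs hs' => ?_⟩, fun x hx => ?_⟩
      · by_cases hsv : s < v
        · exact hint s hs hsv
        · exact hc s (by omega) hs'
      · rcases hvis x hx with hx' | ⟨hx1, hx2, hx3⟩
        · rcases List.mem_append.mp hx' with hxl | hxl
          · exact Or.inl hxl
          · have hxr : x = r := by simpa using hxl
            rw [hxr]
            exact Or.inr ⟨le_refl r, by omega, hrk⟩
        · exact Or.inr ⟨by omega, hx2, hx3⟩

-- get? after the compression loop (all inserts carry the same value ρ)
theorem get?_foldl_insert_const (l : List Int) (ρ : Int) :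
    ∀ (d : PySem.Dict Int Int) (x : Int),
      (l.foldl (fun d r => d.insert r ρ) d).get? x = if x ∈ l then some ρ else d.get? x := by
  induction l with
  | nil => intro d x; simp
  | cons a t ih =>
    intro d x
    simp only [List.foldl_cons, ih]
    by_cases hx : x ∈ t
    · simp [hx]
    · by_cases hxa : x = a
      · rw [hxa]
        simp [hx, PySem.Dict.get?_insert_self]
      · simp [hx, hxa, PySem.Dict.get?_insert_of_ne _ _ hxa]

theorem mem_keys_foldl_insert_const (l : List Int) (ρ : Int) (d : PySem.Dict Int Int) (x : Int) :
    x ∈ (l.foldl (fun d r => d.insert r ρ) d).keys ↔ x ∈ d.keys ∨ x ∈ l := by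
  rw [PySem.Dict.keys_foldl_insert l (fun (_ : PySem.Dict Int Int) (_ : Int) => ρ) d]
  exact PySem.Set.mem_update d.keys l x

-- the two loops, from related states, produce equal answer lists
theorem loop_eq (l : List Int) :
    ∀ (ansA : List Int) (d : PySem.Dict Int Int) (ansB : List Int) (occ : PySem.Set Int),
      InvD d → (∀ x, x ∈ d.keys ↔ x ∈ occ) → ansA = ansB →
      (l.foldl
        (fun (st : List Int × PySem.Dict Int Int) room =>
          let fv := solutionFind st.2 (st.2.keys.length + 1) room []
          let d2 := fv.2.foldl (fun d r => d.insert r fv.1) st.2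
          (st.1 ++ [fv.1], d2.insert fv.1 (fv.1 + 1)))
        (ansA, d)).1 =
      (l.foldl
        (fun (st : List Int × PySem.Set Int) room =>
          let r := scanFree st.2 (st.2.length + 1) room
          (st.1 ++ [r], PySem.Set.add st.2 r))
        (ansB, occ)).1 := by
  induction l with
  | nil => intro ansA d ansB occ _ _ hans; simpa using hans
  | cons room t ih =>
    intro ansA d ansB occ hInv hmem hans
    have hfuelA : d.keys.countP (fun s => decide (room ≤ s)) < d.keys.length + 1 := by
      have := List.countP_le_length (l := d.keys) (p := fun s => decide (room ≤ s))
      omega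
    obtain ⟨hLFA, hvisit⟩ := solutionFind_spec hInv (d.keys.length + 1) room [] hfuelA
    have hfuelB : occ.countP (fun s => decide (room ≤ s)) < occ.length + 1 := by
      have := List.countP_le_length (l := occ) (p := fun s => decide (room ≤ s))
      omega
    have hLFB := scanFree_spec occ (occ.length + 1) room hfuelB
    have hρ : (solutionFind d (d.keys.length + 1) room []).1 =
        scanFree occ (occ.length + 1) room :=
      LeastFree_unique (LeastFree_congr hmem hLFA) hLFB
    obtain ⟨hle, hfree, hbelow⟩ := hLFA
    -- abbreviations (definitionally transparent)
    have hvk : ∀ v ∈ (solutionFind d (d.keys.length + 1) room []).2, v ∈ d.keys := by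
      intro v hv
      rcases hvisit v hv with hv0 | ⟨_, _, hv3⟩
      · cases hv0
      · exact hv3
    have hkeys' : ∀ x,
        x ∈ (((solutionFind d (d.keys.length + 1) room []).2.foldl
            (fun dd r => dd.insert r (solutionFind d (d.keys.length + 1) room []).1) d).insert
            (solutionFind d (d.keys.length + 1) room []).1
            ((solutionFind d (d.keys.length + 1) room []).1 + 1)).keys ↔
          x = (solutionFind d (d.keys.length + 1) room []).1 ∨ x ∈ d.keys := by
      intro x
      rw [PySem.Dict.mem_keys_insert, mem_keys_foldl_insert_const]
      constructor
      · rintro (hx | hx | hx)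
        · exact Or.inl hx
        · exact Or.inr hx
        · exact Or.inr (hvk x hx)
      · rintro (hx | hx)
        · exact Or.inl hx
        · exact Or.inr (Or.inl hx)
    have hInv' : InvD (((solutionFind d (d.keys.length + 1) room []).2.foldl
        (fun dd r => dd.insert r (solutionFind d (d.keys.length + 1) room []).1) d).insert
        (solutionFind d (d.keys.length + 1) room []).1
        ((solutionFind d (d.keys.length + 1) room []).1 + 1)) := by
      intro x v hget
      by_cases hxρ : x = (solutionFind d (d.keys.length + 1) room []).1
      · rw [hxρ, PySem.Dict.get?_insert_self] at hget
        injection hget with hv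
        refine ⟨by omega, fun s hs hs' => ?_⟩
        have hsx : s = x := by omega
        rw [hsx]
        exact (hkeys' x).mpr (Or.inl hxρ)
      · rw [PySem.Dict.get?_insert_of_ne _ _ hxρ, get?_foldl_insert_const] at hget
        by_cases hxv : x ∈ (solutionFind d (d.keys.length + 1) room []).2
        · rw [if_pos hxv] at hget
          injection hget with hv
          rcases hvisit x hxv with hx0 | ⟨hx1, hx2, _⟩
          · cases hx0
          · refine ⟨by omega, fun s hs hs' => ?_⟩
            exact (hkeys' s).mpr (Or.inr (hbelow s (by omega) (by omega)))
        · rw [if_neg hxv] at hget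
          obtain ⟨h1, h2⟩ := hInv x v hget
          exact ⟨h1, fun s hs hs' => (hkeys' s).mpr (Or.inr (h2 s hs hs'))⟩
    have hmem' : ∀ x,
        x ∈ (((solutionFind d (d.keys.length + 1) room []).2.foldl
            (fun dd r => dd.insert r (solutionFind d (d.keys.length + 1) room []).1) d).insert
            (solutionFind d (d.keys.length + 1) room []).1
            ((solutionFind d (d.keys.length + 1) room []).1 + 1)).keys ↔
          x ∈ PySem.Set.add occ (scanFree occ (occ.length + 1) room) := by
      intro x
      rw [hkeys' x, PySem.Set.mem_add, ← hρ]
      constructor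
      · rintro (hx | hx)
        · exact Or.inr hx
        · exact Or.inl ((hmem x).mp hx)
      · rintro (hx | hx)
        · exact Or.inr ((hmem x).mpr hx)
        · exact Or.inl hx
    simp only [List.foldl_cons]
    exact ih (ansA ++ [(solutionFind d (d.keys.length + 1) room []).1]) _
      (ansB ++ [scanFree occ (occ.length + 1) room]) _ hInv' hmem' (by rw [hans, hρ])

theorem InvD_empty : InvD PySem.Dict.empty := by
  intro r v h
  rw [PySem.Dict.get?_empty] at h
  cases h

-- ===== VERDICT (by name: the statement is the Claim_ definition above) =====
theorem solution_spec : Claim_equal_solution := by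
  intro k room_number _
  unfold Spec_solution solution solution_alt
  exact loop_eq room_number [] PySem.Dict.empty [] PySem.Set.empty InvD_empty
    (by simp [PySem.Dict.keys_empty, PySem.Set.empty]) rfl
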